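-- pv_equiv track=rewrite | github.com/tanvirraihan142/LeetCode-Submissions | 2673-make-costs-of-paths-equal-in-a-binary-tree/2673-make-costs-of-paths-equal-in-a-binary-tree.py | minIncrements
-- ===== SOURCE A (Python) =====
-- from typing import List
--
-- def minIncrements(n: int, cost: List[int]) -> int:
--     result = 0
--
--     while len(cost) > 1:
--         x = cost.pop()
--         y = cost.pop()
--         result += abs(x-y)
--         cost[len(cost)//2] += max(x, y)
--
--     return result
-- ===== SOURCE B (Python) =====
-- from typing import List
--
-- def minIncrements(n: int, cost: List[int]) -> int:
--     # Top-down recursive DFS over the implicit heap (0-indexed node j, children 2j+1/2j+2).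
--     # Return-value equivalent to A; unlike A it does not mutate `cost`.
--     if not cost:
--         return 0
--     m = len(cost)
--
--     def dfs(j):
--         if 2 * j + 2 > m:
--             return 0, cost[j]
--         tl, l = dfs(2 * j + 1)
--         tr, r = dfs(2 * j + 2)
--         return tl + tr + abs(l - r), cost[j] + max(l, r)
--
--     return dfs(0)[0]
-- ===== Notes on version B (the rewrite author's own statement) =====
-- stated objective: alternative
-- what changed: Replaces A's destructive tail-to-head loop (pop the last two children, fold their max into the parent slot of the shrinking array) with a pure top-down recursive DFS over the implicit heap that returns (subtree increments, equalized path cost) per node and never mutates the input.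
import Mathlib
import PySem

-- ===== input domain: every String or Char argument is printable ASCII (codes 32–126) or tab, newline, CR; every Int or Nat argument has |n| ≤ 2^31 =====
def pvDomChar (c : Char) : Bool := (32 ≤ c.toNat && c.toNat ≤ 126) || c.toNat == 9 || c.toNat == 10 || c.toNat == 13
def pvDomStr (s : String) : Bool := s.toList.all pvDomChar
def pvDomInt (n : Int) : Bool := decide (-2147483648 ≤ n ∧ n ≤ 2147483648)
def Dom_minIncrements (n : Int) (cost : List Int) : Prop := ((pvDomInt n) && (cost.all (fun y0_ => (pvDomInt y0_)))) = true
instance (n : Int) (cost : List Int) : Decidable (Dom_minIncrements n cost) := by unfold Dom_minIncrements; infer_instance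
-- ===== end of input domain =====

-- B replaces A's destructive tail-to-head loop with a pure top-down recursive DFS over the
-- implicit heap (alternative decomposition, same cost). A empties the input list in place;
-- the equivalence proved here is about the RETURN value only (B does not mutate).

-- ===== PORT A =====
-- while len(cost) > 1: x = cost.pop(); y = cost.pop(); result += abs(x-y); cost[len(cost)//2] += max(x,y)
def minIncrementsLoopA (cost : List Int) (result : Int) : Int :=
  if 1 < cost.length then
    match h1 : PySem.List.pop? cost (-1) with
    | none => result            -- unreachable under the guard
    | some (x, c1) =>
      match h2 : PySem.List.pop? c1 (-1) with
      | none => result          -- unreachable under the guard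
      | some (y, c2) =>
        let idx := PySem.Int.floordiv (PySem.List.len c2) 2
        minIncrementsLoopA (PySem.List.pySetD c2 idx (PySem.List.pyGetD c2 idx 0 + max x y))
          (result + |x - y|)
  else result
termination_by cost.length
decreasing_by
  have e1 : c1.length + 1 = cost.length := PySem.List.length_of_pop?_eq_some _ h1
  have e2 : c2.length + 1 = c1.length := PySem.List.length_of_pop?_eq_some _ h2
  simp only [PySem.List.length_pySetD]
  omega

def minIncrements (n : Int) (cost : List Int) : Int :=
  minIncrementsLoopA cost 0

-- ===== PORT B =====
-- dfs(j) returns (total increments in subtree of node j, equalized root-to-leaf cost of that subtree)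
def minIncrementsDfs (cost : List Int) (m : Nat) (j : Nat) : Int × Int :=
  if 2 * j + 2 > m then (0, cost.getD j 0)
  else
    let lp := minIncrementsDfs cost m (2 * j + 1)
    let rp := minIncrementsDfs cost m (2 * j + 2)
    (lp.1 + rp.1 + |lp.2 - rp.2|, cost.getD j 0 + max lp.2 rp.2)
termination_by m - j
decreasing_by all_goals omega

def minIncrements_alt (n : Int) (cost : List Int) : Int :=
  if cost = [] then 0
  else (minIncrementsDfs cost cost.length 0).1

-- ===== PRECONDITION & SPEC =====
-- Pre_ excludes non-empty even-length lists, on which Python A raises IndexError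
-- (after the two pops the parent write cost[len(cost)//2] eventually hits an empty list).
def Pre_minIncrements (n : Int) (cost : List Int) : Prop := cost = [] ∨ cost.length % 2 = 1
instance (n : Int) (cost : List Int) : Decidable (Pre_minIncrements n cost) := by
  unfold Pre_minIncrements; infer_instance

def pvWitness_minIncrements : Int × List Int := (3, [1, 5, 3])

def Spec_minIncrements (n : Int) (cost : List Int) (out : Int) : Prop := out = minIncrements_alt n cost
instance (n : Int) (cost : List Int) (out : Int) : Decidable (Spec_minIncrements n cost out) := by
  unfold Spec_minIncrements; infer_instance

-- ===== CLAIM (what is proved, stated in full; the proofs are below) =====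
def Claim_equal_minIncrements : Prop := ∀ (n : Int) (cost : List Int), Dom_minIncrements n cost → Pre_minIncrements n cost → Spec_minIncrements n cost (minIncrements n cost)

-- ===== LEMMAS AND PROOFS =====

-- `isAnc j jp` : node j is an ancestor-or-self of node jp in the implicit heap (0-indexed).
def isAnc (j jp : Nat) : Bool :=
  if j = jp then true
  else if jp = 0 then false
  else isAnc j ((jp - 1) / 2)
termination_by jp
decreasing_by omega

lemma isAnc_le {j jp : Nat} (h : isAnc j jp = true) : j = jp ∨ 2 * j + 1 ≤ jp := by
  induction jp using Nat.strong_induction_on with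
  | _ jp ih =>
    rw [isAnc] at h
    by_cases hj : j = jp
    · exact Or.inl hj
    · rw [if_neg hj] at h
      by_cases h0 : jp = 0
      · rw [if_pos h0] at h; simp at h
      · rw [if_neg h0] at h
        rcases ih ((jp - 1) / 2) (by omega) h with h' | h' <;> omega

lemma isAnc_false_of_gt {j jp : Nat} (h : jp < j) : isAnc j jp = false := by
  by_cases h2 : isAnc j jp = true
  · rcases isAnc_le h2 with e | e <;> omega
  · simpa using h2

lemma isAnc_children {j jp : Nat} (hne : j ≠ jp) :
    isAnc j jp = (isAnc (2 * j + 1) jp || isAnc (2 * j + 2) jp) ∧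
    ¬(isAnc (2 * j + 1) jp = true ∧ isAnc (2 * j + 2) jp = true) := by
  induction jp using Nat.strong_induction_on with
  | _ jp ih =>
    by_cases h0 : jp = 0
    · subst h0
      refine ⟨?_, ?_⟩
      · rw [isAnc, if_neg hne, if_pos rfl]
        rw [isAnc, if_neg (by omega : ¬ 2 * j + 1 = 0), if_pos rfl]
        rw [isAnc, if_neg (by omega : ¬ 2 * j + 2 = 0), if_pos rfl]
        simp
      · rintro ⟨h1, -⟩
        rw [isAnc, if_neg (by omega : ¬ 2 * j + 1 = 0), if_pos rfl] at h1
        simp at h1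
    · have hLj : isAnc j jp = isAnc j ((jp - 1) / 2) := by
        rw [isAnc, if_neg hne, if_neg h0]
      by_cases hc1 : 2 * j + 1 = jp
      · have e1 : isAnc (2 * j + 1) jp = true := by rw [isAnc, if_pos hc1]
        have e2 : isAnc (2 * j + 2) jp = false := isAnc_false_of_gt (by omega)
        have hpj : (jp - 1) / 2 = j := by omega
        have hjj : isAnc j ((jp - 1) / 2) = true := by rw [hpj, isAnc, if_pos rfl]
        refine ⟨?_, ?_⟩
        · rw [hLj, hjj, e1, e2]; rfl
        · rintro ⟨-, h2⟩; rw [e2] at h2; cases h2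
      · by_cases hc2 : 2 * j + 2 = jp
        · have hpj : (jp - 1) / 2 = j := by omega
          have e1 : isAnc (2 * j + 1) jp = false := by
            rw [isAnc, if_neg hc1, if_neg h0, hpj]
            exact isAnc_false_of_gt (by omega)
          have e2 : isAnc (2 * j + 2) jp = true := by rw [isAnc, if_pos hc2]
          have hjj : isAnc j ((jp - 1) / 2) = true := by rw [hpj, isAnc, if_pos rfl]
          refine ⟨?_, ?_⟩
          · rw [hLj, hjj, e1, e2]; rfl
          · rintro ⟨h1, -⟩; rw [e1] at h1; cases h1
        · have hjp' : j ≠ (jp - 1) / 2 := by omega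
          have e1 : isAnc (2 * j + 1) jp = isAnc (2 * j + 1) ((jp - 1) / 2) := by
            rw [isAnc, if_neg hc1, if_neg h0]
          have e2 : isAnc (2 * j + 2) jp = isAnc (2 * j + 2) ((jp - 1) / 2) := by
            rw [isAnc, if_neg hc2, if_neg h0]
          obtain ⟨ihe, ihn⟩ := ih ((jp - 1) / 2) (by omega) hjp'
          refine ⟨by rw [hLj, e1, e2, ihe], ?_⟩
          rintro ⟨h1, h2⟩
          rw [e1] at h1; rw [e2] at h2
          exact ihn ⟨h1, h2⟩

lemma isAnc_zero (jp : Nat) : isAnc 0 jp = true := by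
  induction jp using Nat.strong_induction_on with
  | _ jp ih =>
    rw [isAnc]
    by_cases h : 0 = jp
    · rw [if_pos h]
    · rw [if_neg h, if_neg (by omega : ¬ jp = 0)]
      exact ih _ (by omega)

-- the single-iteration effect of A's loop on a list exposed as l ++ [y, x]
lemma loopA_step (l : List Int) (y x r : Int) :
    minIncrementsLoopA (l ++ [y, x]) r =
      minIncrementsLoopA (l.set (l.length / 2) (l.getD (l.length / 2) 0 + max x y)) (r + |x - y|) := by
  have hassoc : l ++ [y, x] = (l ++ [y]) ++ [x] := by simp
  conv_lhs => rw [minIncrementsLoopA.eq_def, hassoc, PySem.List.pop?_last (l ++ [y]) x]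
  rw [if_pos (by simp)]
  simp only []
  rw [PySem.List.pop?_last l y]
  simp only []
  have hidx : PySem.Int.floordiv (PySem.List.len l) 2 = ((l.length / 2 : Nat) : Int) := by
    rw [PySem.List.len_eq]
    exact_mod_cast PySem.Int.floordiv_natCast l.length 2
  simp only [hidx, PySem.List.pySetD_natCast, PySem.List.pyGetD_natCast]

-- unfolding equations for the B-side recursion
lemma dfs_leaf (c : List Int) (m j : Nat) (h : 2 * j + 2 > m) :
    minIncrementsDfs c m j = (0, c.getD j 0) := by
  rw [minIncrementsDfs.eq_def, if_pos h]

lemma dfs_node (c : List Int) (m j : Nat) (h : ¬ 2 * j + 2 > m) :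
    minIncrementsDfs c m j =
      ((minIncrementsDfs c m (2 * j + 1)).1 + (minIncrementsDfs c m (2 * j + 2)).1 +
          |(minIncrementsDfs c m (2 * j + 1)).2 - (minIncrementsDfs c m (2 * j + 2)).2|,
        c.getD j 0 + max (minIncrementsDfs c m (2 * j + 1)).2 (minIncrementsDfs c m (2 * j + 2)).2) := by
  rw [minIncrementsDfs.eq_def, if_neg h]

-- core comparison: dfs on l ++ [y, x] versus dfs on l with the parent slot absorbed
lemma dfs_absorb (l : List Int) (y x : Int) (hodd : l.length % 2 = 1) :
    ∀ j, j < l.length →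
      (minIncrementsDfs (l ++ [y, x]) (l.length + 2) j).2 =
        (minIncrementsDfs (l.set (l.length / 2) (l.getD (l.length / 2) 0 + max x y)) l.length j).2 ∧
      (minIncrementsDfs (l ++ [y, x]) (l.length + 2) j).1 =
        (minIncrementsDfs (l.set (l.length / 2) (l.getD (l.length / 2) 0 + max x y)) l.length j).1 +
          (if isAnc j (l.length / 2) then |x - y| else 0) := by
  set jp := l.length / 2 with hjp
  set c := l ++ [y, x] with hc
  set c' := l.set jp (l.getD jp 0 + max x y) with hc'
  have hjp2 : 2 * jp + 1 = l.length := by omega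
  suffices h : ∀ d j, l.length - j ≤ d → j < l.length →
      (minIncrementsDfs c (l.length + 2) j).2 = (minIncrementsDfs c' l.length j).2 ∧
      (minIncrementsDfs c (l.length + 2) j).1 =
        (minIncrementsDfs c' l.length j).1 + (if isAnc j jp then |x - y| else 0) by
    intro j hj; exact h l.length j (by omega) hj
  intro d
  induction d with
  | zero => intro j h1 h2; omega
  | succ d ih =>
    intro j hd hj
    by_cases hjpj : j = jp
    · subst hjpj
      -- node j = jp : internal in c (children are the two appended leaves), leaf in c'
      have hn : ¬ 2 * jp + 2 > l.length + 2 := by omega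
      have hl1 : 2 * jp + 1 = l.length := hjp2
      rw [dfs_node c _ jp hn, dfs_leaf c' _ jp (by omega),
        dfs_leaf c _ (2 * jp + 1) (by omega), dfs_leaf c _ (2 * jp + 2) (by omega)]
      have hy : c.getD (2 * jp + 1) 0 = y := by
        rw [hjp2, hc]; simp [List.getD_eq_getElem?_getD, List.getElem?_append_right]
      have hx : c.getD (2 * jp + 2) 0 = x := by
        rw [show 2 * jp + 2 = l.length + 1 by omega, hc]
        simp [List.getD_eq_getElem?_getD, List.getElem?_append_right]
      have hcj : c.getD jp 0 = l.getD jp 0 := by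
        rw [hc]; simp [List.getD_eq_getElem?_getD, List.getElem?_append_left (show jp < l.length by omega)]
      have hc'j : c'.getD jp 0 = l.getD jp 0 + max x y := by
        rw [hc']; simp [List.getD_eq_getElem?_getD, List.getElem?_set_self (show jp < l.length by omega)]
      have hanc : isAnc jp jp = true := by rw [isAnc, if_pos rfl]
      refine ⟨?_, ?_⟩
      · simp only [hy, hx, hcj, hc'j]
        rw [max_comm]
      · simp only [hy, hx, hanc, if_pos]
        rw [abs_sub_comm]
        ring
    · by_cases hleaf : 2 * j + 2 > l.length + 2
      · -- leaf in both
        have hgt : jp < j := by omega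
        rw [dfs_leaf c _ j hleaf, dfs_leaf c' _ j (by omega)]
        have h1 : c.getD j 0 = l.getD j 0 := by
          rw [hc]; simp [List.getD_eq_getElem?_getD, List.getElem?_append_left hj]
        have h2 : c'.getD j 0 = l.getD j 0 := by
          rw [hc']; simp [List.getD_eq_getElem?_getD, List.getElem?_set_ne (show jp ≠ j by omega)]
        refine ⟨by rw [h1, h2], ?_⟩
        rw [isAnc_false_of_gt hgt]
        simp [h1, h2]
      · -- internal in both
        have hch : 2 * j + 2 < l.length := by omega
        have ih1 := ih (2 * j + 1) (by omega) (by omega)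
        have ih2 := ih (2 * j + 2) (by omega) (by omega)
        rw [dfs_node c _ j (by omega), dfs_node c' _ j (by omega)]
        have h1 : c.getD j 0 = l.getD j 0 := by
          rw [hc]; simp [List.getD_eq_getElem?_getD, List.getElem?_append_left hj]
        have h2 : c'.getD j 0 = l.getD j 0 := by
          rw [hc']; simp [List.getD_eq_getElem?_getD, List.getElem?_set_ne (show jp ≠ j by omega)]
        obtain ⟨hv1, ht1⟩ := ih1
        obtain ⟨hv2, ht2⟩ := ih2
        obtain ⟨hor, hnand⟩ := isAnc_children hjpj
        refine ⟨by simp only [hv1, hv2, h1, h2], ?_⟩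
        simp only [ht1, ht2, hv1, hv2, hor]
        cases ha1 : isAnc (2 * j + 1) jp <;> cases ha2 : isAnc (2 * j + 2) jp
        · simp
        · simp; ring
        · simp; ring
        · exact absurd ⟨ha1, ha2⟩ hnand

lemma loopA_eq_dfs : ∀ (c : List Int) (r : Int), c.length % 2 = 1 →
    minIncrementsLoopA c r = r + (minIncrementsDfs c c.length 0).1 := by
  suffices h : ∀ N c r, c.length ≤ N → c.length % 2 = 1 →
      minIncrementsLoopA c r = r + (minIncrementsDfs c c.length 0).1 by
    intro c r hodd; exact h c.length c r le_rfl hodd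
  intro N
  induction N with
  | zero => intro c r h1 h2; omega
  | succ N ih =>
    intro c r hlen hodd
    by_cases h1 : c.length = 1
    · obtain ⟨a, rfl⟩ : ∃ a, c = [a] := by
        match c, h1 with | [a], _ => exact ⟨a, rfl⟩
      rw [minIncrementsLoopA.eq_def, if_neg (by simp), dfs_leaf _ _ _ (by simp)]
      simp
    · have h3 : 3 ≤ c.length := by omega
      rcases c.eq_nil_or_concat with rfl | ⟨c1, x', rfl⟩
      · simp at h3
      rcases c1.eq_nil_or_concat with rfl | ⟨l, y', rfl⟩
      · simp at h3
      have heq : (l ++ [y']) ++ [x'] = l ++ [y', x'] := by simp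
      rw [List.concat_eq_append, List.concat_eq_append, heq] at *
      have hlodd : l.length % 2 = 1 := by simp at hodd; omega
      rw [loopA_step]
      have hlen'' : (l.set (l.length / 2) (l.getD (l.length / 2) 0 + max x' y')).length = l.length := by
        simp
      rw [ih _ (r + |x' - y'|) (by rw [hlen'']; simp at hlen; omega) (by rw [hlen'']; omega)]
      have habs := (dfs_absorb l y' x' hlodd 0 (by omega)).2
      rw [hlen'', show (l ++ [y', x']).length = l.length + 2 by simp, habs, isAnc_zero]
      simp
      ring

-- ===== VERDICT (by name: the statement is the Claim_ definition above) =====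
theorem minIncrements_spec : Claim_equal_minIncrements := by
  intro n cost _ hpre
  unfold Spec_minIncrements minIncrements minIncrements_alt
  rcases hpre with h | h
  · subst h
    rw [if_pos rfl, minIncrementsLoopA.eq_def]
    simp
  · have hne : cost ≠ [] := by intro e; subst e; simp at h
    rw [if_neg hne, loopA_eq_dfs cost 0 h, zero_add]
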